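-- pv_equiv track=rewrite | github.com/omerwarth/tensorAbuse-deliverables | tensorAbuseWithDetectFramework/TensorDetect/tensordetect_workflow_large_model_hub_scan.py | preferred_hf_artifact
-- ===== SOURCE A (Python) =====
-- def preferred_hf_artifact(siblings):
--     names = [s.get("rfilename", "") for s in siblings or []]
--     for n in names:
--         if n.endswith("saved_model.pb"):
--             return n
--     h5 = [n for n in names if n.lower().endswith(".h5")]
--     if h5:
--         return sorted(h5, key=len)[0]
--     zips = [n for n in names if n.lower().endswith(".zip")]
--     if zips:
--         return sorted(zips, key=len)[0]
--     tars = [n for n in names if n.lower().endswith((".tar.gz", ".tgz"))]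
--     if tars:
--         return sorted(tars, key=len)[0]
--     return None
-- ===== SOURCE B (Python) =====
-- def _better(b, n):
--     return b is None or len(n) < len(b)
--
--
-- def preferred_hf_artifact(siblings):
--     sm = h5 = zp = tar = None
--     for s in (siblings or []):
--         n = s.get("rfilename", "")
--         if sm is None and n.endswith("saved_model.pb"):
--             sm = n
--         l = n.lower()
--         if l.endswith(".h5") and _better(h5, n):
--             h5 = n
--         if l.endswith(".zip") and _better(zp, n):
--             zp = n
--         if l.endswith((".tar.gz", ".tgz")) and _better(tar, n):
--             tar = n
--     if sm is not None:
--         return sm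
--     if h5 is not None:
--         return h5
--     if zp is not None:
--         return zp
--     return tar
-- ===== Notes on version B (the rewrite author's own statement) =====
-- stated objective: alternative
-- what changed: B replaces A's early-return scan plus three separate filter+sort passes by a single traversal that keeps the first saved_model.pb match and the first-shortest name of each suffix bucket, then returns the buckets in priority order.
import Mathlib
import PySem

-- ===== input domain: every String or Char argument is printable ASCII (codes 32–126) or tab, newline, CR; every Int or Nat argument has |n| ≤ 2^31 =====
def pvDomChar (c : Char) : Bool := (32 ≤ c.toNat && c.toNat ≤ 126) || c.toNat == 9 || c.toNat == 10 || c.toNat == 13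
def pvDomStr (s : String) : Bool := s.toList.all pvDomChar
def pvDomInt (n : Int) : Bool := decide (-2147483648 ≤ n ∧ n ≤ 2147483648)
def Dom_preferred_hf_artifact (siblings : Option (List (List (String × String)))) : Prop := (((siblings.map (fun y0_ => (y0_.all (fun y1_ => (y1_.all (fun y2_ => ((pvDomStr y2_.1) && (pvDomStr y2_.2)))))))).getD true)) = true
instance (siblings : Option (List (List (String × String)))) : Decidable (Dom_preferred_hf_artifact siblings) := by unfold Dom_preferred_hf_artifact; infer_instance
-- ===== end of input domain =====

-- One honest line: B makes a single pass keeping the first saved_model.pb match and the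
-- first-shortest name per suffix bucket, instead of A's scan plus three filter+sort passes.

-- ===== PORT A =====
-- shared suffix tests (the same tests both Pythons perform)
def pvName (s : List (String × String)) : String := PySem.Dict.getD ⟨s⟩ "rfilename" ""
def pvIsSM (n : String) : Bool := PySem.Str.endswith n "saved_model.pb"
def pvIsH5 (n : String) : Bool := PySem.Str.endswith (PySem.Str.lower n) ".h5"
def pvIsZip (n : String) : Bool := PySem.Str.endswith (PySem.Str.lower n) ".zip"
def pvIsTar (n : String) : Bool :=
  PySem.Str.endswith (PySem.Str.lower n) ".tar.gz" || PySem.Str.endswith (PySem.Str.lower n) ".tgz"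

def preferred_hf_artifact (siblings : Option (List (List (String × String)))) : Option String :=
  let names := (siblings.getD []).map pvName
  match names.find? pvIsSM with
  | some n => some n
  | none =>
    let h5 := names.filter pvIsH5
    if h5 ≠ [] then (PySem.List.sorted h5 (fun n => PySem.Str.len n) false).head?
    else
      let zips := names.filter pvIsZip
      if zips ≠ [] then (PySem.List.sorted zips (fun n => PySem.Str.len n) false).head?
      else
        let tars := names.filter pvIsTar
        if tars ≠ [] then (PySem.List.sorted tars (fun n => PySem.Str.len n) false).head?
        else none

-- ===== PORT B =====
-- _better(b, n): keep n iff no candidate yet or n is strictly shorter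
def pvBetter (b : Option String) (n : String) : Bool :=
  match b with
  | none => true
  | some m => decide (PySem.Str.len n < PySem.Str.len m)

def pvStep (st : Option String × Option String × Option String × Option String)
    (s : List (String × String)) :
    Option String × Option String × Option String × Option String :=
  let n := pvName s
  let sm := if st.1.isNone && pvIsSM n then some n else st.1
  let h5 := if pvIsH5 n && pvBetter st.2.1 n then some n else st.2.1
  let zp := if pvIsZip n && pvBetter st.2.2.1 n then some n else st.2.2.1
  let tar := if pvIsTar n && pvBetter st.2.2.2 n then some n else st.2.2.2
  (sm, h5, zp, tar)

def preferred_hf_artifact_alt (siblings : Option (List (List (String × String)))) : Option String :=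
  let st := (siblings.getD []).foldl pvStep (none, none, none, none)
  match st.1 with
  | some n => some n
  | none =>
    match st.2.1 with
    | some n => some n
    | none =>
      match st.2.2.1 with
      | some n => some n
      | none => st.2.2.2

-- ===== PRECONDITION & SPEC =====
def Spec_preferred_hf_artifact (siblings : Option (List (List (String × String)))) (out : Option String) : Prop := out = preferred_hf_artifact_alt siblings
instance (siblings : Option (List (List (String × String)))) (out : Option String) : Decidable (Spec_preferred_hf_artifact siblings out) := by unfold Spec_preferred_hf_artifact; infer_instance

-- ===== CLAIM (what is proved, stated in full; the proofs are below) =====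
def Claim_equal_preferred_hf_artifact : Prop := ∀ (siblings : Option (List (List (String × String)))), Dom_preferred_hf_artifact siblings → Spec_preferred_hf_artifact siblings (preferred_hf_artifact siblings)

-- ===== LEMMAS AND PROOFS =====

-- the "keep the first-shortest" accumulator
def pvMin (b : Option String) (n : String) : Option String :=
  if pvBetter b n then some n else b

-- find? is the first-match fold
theorem pv_foldl_keep_some (l : List String) (p : String → Bool) (x : String) :
    l.foldl (fun b n => if b.isNone && p n then some n else b) (some x) = some x := by
  induction l with
  | nil => rfl
  | cons a t ih => simpa using ih

theorem pv_find_eq_foldl (l : List String) (p : String → Bool) :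
    l.find? p = l.foldl (fun b n => if b.isNone && p n then some n else b) none := by
  induction l with
  | nil => rfl
  | cons a t ih =>
    by_cases h : p a = true
    · rw [List.find?_cons_of_pos h, List.foldl_cons]
      have : (if ((none : Option String).isNone && p a) = true then some a else none) = some a := by
        simp [h]
      rw [this, pv_foldl_keep_some]
    · rw [List.find?_cons_of_neg h, List.foldl_cons]
      have : (if ((none : Option String).isNone && p a) = true then some a else none) = none := by
        simp [h]
      rw [this, ih]

-- folding only on the filtered elements
theorem pv_foldl_filter (l : List String) (p : String → Bool)
    (g : Option String → String → Option String) (init : Option String) :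
    l.foldl (fun b n => if p n then g b n else b) init = (l.filter p).foldl g init := by
  induction l generalizing init with
  | nil => rfl
  | cons a t ih =>
    by_cases h : p a = true <;> simp [List.filter, h, ih]

theorem pv_head_insertBy (x : String) (ys : List String) (p : String → String → Bool) :
    (PySem.List.insertBy p x ys).head? =
      some (match ys with | [] => x | y :: _ => if p x y then x else y) := by
  cases ys with
  | nil => simp [PySem.List.insertBy]
  | cons y t =>
    by_cases h : p x y = true <;> simp [PySem.List.insertBy, h]

-- head of the stable insertion sort = running first-shortest
theorem pv_head_foldl_insertBy (l : List String) (acc : List String) :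
    (l.foldl (fun a x => PySem.List.insertBy
        (fun a b => decide (PySem.Str.len a < PySem.Str.len b)) x a) acc).head? =
      l.foldl pvMin acc.head? := by
  induction l generalizing acc with
  | nil => rfl
  | cons x t ih =>
    rw [List.foldl_cons, List.foldl_cons, ih]
    congr 1
    rw [pv_head_insertBy]
    cases acc with
    | nil => rfl
    | cons y ys =>
      by_cases h : x.length < y.length <;>
        simp [pvMin, pvBetter, h]

theorem pv_head_sorted (l : List String) :
    (PySem.List.sorted l (fun n => PySem.Str.len n) false).head? = l.foldl pvMin none := by
  rw [PySem.List.sorted_eq_foldl_insertBy]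
  simpa using pv_head_foldl_insertBy l []

-- the combined one-pass fold computes the four independent folds
theorem pv_step_split (sibs : List (List (String × String)))
    (a b c d : Option String) :
    sibs.foldl pvStep (a, b, c, d) =
      ((sibs.map pvName).foldl (fun s n => if s.isNone && pvIsSM n then some n else s) a,
       (sibs.map pvName).foldl (fun s n => if pvIsH5 n then pvMin s n else s) b,
       (sibs.map pvName).foldl (fun s n => if pvIsZip n then pvMin s n else s) c,
       (sibs.map pvName).foldl (fun s n => if pvIsTar n then pvMin s n else s) d) := by
  induction sibs generalizing a b c d with
  | nil => rfl
  | cons s t ih =>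
    rw [List.foldl_cons]
    show t.foldl pvStep _ = _
    rw [ih]
    simp only [pvStep, pvMin, List.map_cons, List.foldl_cons]
    by_cases h1 : pvIsH5 (pvName s) = true <;>
      by_cases h2 : pvIsZip (pvName s) = true <;>
        by_cases h3 : pvIsTar (pvName s) = true <;>
          simp [h1, h2, h3]

theorem pv_filter_nil_iff (l : List String) (p : String → Bool) :
    l.foldl (fun b n => if p n then pvMin b n else b) none = none ↔ l.filter p = [] := by
  rw [pv_foldl_filter, ← pv_head_sorted, List.head?_eq_none_iff,
    PySem.List.sorted_eq_nil_iff]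

theorem pv_branch (l : List String) (p : String → Bool) (m : String)
    (h : l.foldl (fun b n => if p n then pvMin b n else b) none = some m) :
    (PySem.List.sorted (l.filter p) (fun n => PySem.Str.len n) false).head? = some m := by
  rw [pv_head_sorted, ← pv_foldl_filter]; exact h

-- ===== VERDICT (by name: the statement is the Claim_ definition above) =====
theorem preferred_hf_artifact_spec : Claim_equal_preferred_hf_artifact := by
  intro siblings _
  show preferred_hf_artifact siblings = preferred_hf_artifact_alt siblings
  unfold preferred_hf_artifact preferred_hf_artifact_alt
  rw [pv_step_split]
  simp only [pv_find_eq_foldl]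
  set l := (siblings.getD []).map pvName with hl
  cases hsm : l.foldl (fun b n => if b.isNone && pvIsSM n then some n else b) none with
  | some n => rfl
  | none =>
    by_cases h5 : l.filter pvIsH5 = []
    · by_cases hz : l.filter pvIsZip = []
      · by_cases ht : l.filter pvIsTar = []
        · simp [h5, hz, ht, (pv_filter_nil_iff l pvIsH5).2 h5,
            (pv_filter_nil_iff l pvIsZip).2 hz, (pv_filter_nil_iff l pvIsTar).2 ht]
        · have hne := (pv_filter_nil_iff l pvIsTar).not.2 ht
          cases hft : l.foldl (fun b n => if pvIsTar n then pvMin b n else b) none with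
          | none => exact absurd hft hne
          | some m =>
            have hh := pv_branch l pvIsTar m hft
            simp [h5, hz, ht, (pv_filter_nil_iff l pvIsH5).2 h5,
              (pv_filter_nil_iff l pvIsZip).2 hz]
            simpa using hh
      · have hne := (pv_filter_nil_iff l pvIsZip).not.2 hz
        cases hfz : l.foldl (fun b n => if pvIsZip n then pvMin b n else b) none with
        | none => exact absurd hfz hne
        | some m =>
          have hh := pv_branch l pvIsZip m hfz
          simp [h5, hz, (pv_filter_nil_iff l pvIsH5).2 h5]
          simpa using hh
    · have hne := (pv_filter_nil_iff l pvIsH5).not.2 h5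
      cases hf5 : l.foldl (fun b n => if pvIsH5 n then pvMin b n else b) none with
      | none => exact absurd hf5 hne
      | some m =>
        have hh := pv_branch l pvIsH5 m hf5
        simp [h5]
        simpa using hh
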